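-- pv_equiv track=rewrite | github.com/Kier73/Matrix_V_SDK | matrix_v_sdk/examples/test_tmatrix_rigor.py | hilbert_encode
-- ===== SOURCE A (Python) =====
-- def hilbert_encode(i, j, order):
--     d = 0
--     s = 1 << (order - 1)
--     while s > 0:
--         rx = 1 if (i & s) > 0 else 0
--         ry = 1 if (j & s) > 0 else 0
--         d += s * s * ((3 * rx) ^ ry)
--         if ry == 0:
--             if rx == 1:
--                 i = s - 1 - i
--                 j = s - 1 - j
--             i, j = j, i
--         s >>= 1
--     return d
-- ===== SOURCE B (Python) =====
-- def hilbert_encode(i, j, order):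
--     # Bit-serial DFA formulation: instead of rewriting the coordinates at each
--     # scale like the classic loop, walk the bit positions from the top keeping
--     # a 2-bit orientation state (swap, flip); each step reads one bit of each
--     # coordinate and emits a closed-form contribution 4**k * digit.
--     d = 0
--     sw = 0
--     flip = 0
--     k = order - 1
--     while k >= 0:
--         bi = (i >> k) & 1
--         bj = (j >> k) & 1
--         rx = (bj if sw == 1 else bi) ^ flip
--         ry = (bi if sw == 1 else bj) ^ flip
--         d += (1 << (2 * k)) * ((3 * rx) ^ ry)
--         if ry == 0:
--             sw = sw ^ 1
--             flip = flip ^ rx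
--         k -= 1
--     return d
-- ===== Notes on version B (the rewrite author's own statement) =====
-- stated objective: alternative
-- what changed: Replaces the loop that repeatedly rewrites the coordinates (reflect s-1-i, s-1-j and swap at each scale) by a bit-serial DFA: a single descent over bit positions that never mutates i and j, instead keeping a 2-bit orientation state (swap, flip) and combining the raw coordinate bits with that state to emit each base-4 digit in closed form 4**k * digit; dropping the per-iteration full-width arbitrary-precision subtractions makes B measurably faster at large order.
import Mathlib
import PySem

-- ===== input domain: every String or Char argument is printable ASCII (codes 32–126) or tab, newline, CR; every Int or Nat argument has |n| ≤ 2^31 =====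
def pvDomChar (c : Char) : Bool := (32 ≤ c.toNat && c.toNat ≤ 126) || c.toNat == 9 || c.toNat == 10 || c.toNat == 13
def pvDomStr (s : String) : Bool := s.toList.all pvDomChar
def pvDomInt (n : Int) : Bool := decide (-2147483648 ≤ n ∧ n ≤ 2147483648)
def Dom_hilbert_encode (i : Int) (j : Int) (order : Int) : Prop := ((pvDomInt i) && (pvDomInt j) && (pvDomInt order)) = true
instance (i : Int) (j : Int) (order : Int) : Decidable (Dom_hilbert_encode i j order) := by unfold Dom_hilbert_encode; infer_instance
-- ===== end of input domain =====

-- B replaces A's coordinate-rewriting loop by a bit-serial descent that keeps a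
-- 2-bit orientation state (swap, flip) and never mutates the coordinates
-- (objective: alternative; a timing run measured B faster at large order).

-- ===== PORT A =====
-- A's while loop: state (d, i, j, s); s halves each iteration
def pvLoopA (d i j s : Int) : Int :=
  if h : 0 < s then
    let rx : Int := if 0 < PySem.Int.band i s then 1 else 0
    let ry : Int := if 0 < PySem.Int.band j s then 1 else 0
    let d' := d + s * s * PySem.Int.bxor (3 * rx) ry
    if ry = 0 then
      if rx = 1 then pvLoopA d' (s - 1 - j) (s - 1 - i) (s >>> (1 : Nat))
      else pvLoopA d' j i (s >>> (1 : Nat))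
    else pvLoopA d' i j (s >>> (1 : Nat))
  else d
termination_by s.toNat
decreasing_by
  all_goals
    have := Int.shiftRight_eq_div_pow s 1
    norm_num at this; omega

def hilbert_encode (i : Int) (j : Int) (order : Int) : Int :=
  -- s = 1 << (order - 1); Python raises ValueError for order ≤ 0 (excluded by Pre_)
  pvLoopA 0 i j ((1 : Int) <<< (order - 1).toNat)

-- ===== PORT B =====
-- B's while loop: state (d, sw, flip, k); k counts down over bit positions
def pvLoopB (i j d sw flip k : Int) : Int :=
  if h : 0 ≤ k then
    let bi : Int := PySem.Int.band (i >>> k.toNat) 1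
    let bj : Int := PySem.Int.band (j >>> k.toNat) 1
    let rx : Int := PySem.Int.bxor (if sw = 1 then bj else bi) flip
    let ry : Int := PySem.Int.bxor (if sw = 1 then bi else bj) flip
    let d' := d + ((1 : Int) <<< (2 * k).toNat) * PySem.Int.bxor (3 * rx) ry
    if ry = 0 then pvLoopB i j d' (PySem.Int.bxor sw 1) (PySem.Int.bxor flip rx) (k - 1)
    else pvLoopB i j d' sw flip (k - 1)
  else d
termination_by (k + 1).toNat
decreasing_by all_goals omega

def hilbert_encode_alt (i : Int) (j : Int) (order : Int) : Int :=
  pvLoopB i j 0 0 0 (order - 1)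

-- ===== PRECONDITION & SPEC =====
-- Pre_ excludes exactly order ≤ 0, where Python A raises ValueError (1 << (order-1), negative shift count).
def Pre_hilbert_encode (i : Int) (j : Int) (order : Int) : Prop := 1 ≤ order
instance (i : Int) (j : Int) (order : Int) : Decidable (Pre_hilbert_encode i j order) := by unfold Pre_hilbert_encode; infer_instance
def pvWitness_hilbert_encode : Int × Int × Int := (5, 3, 3)

def Spec_hilbert_encode (i : Int) (j : Int) (order : Int) (out : Int) : Prop := out = hilbert_encode_alt i j order
instance (i : Int) (j : Int) (order : Int) (out : Int) : Decidable (Spec_hilbert_encode i j order out) := by unfold Spec_hilbert_encode; infer_instance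

-- ===== CLAIM (what is proved, stated in full; the proofs are below) =====
def Claim_equal_hilbert_encode : Prop := ∀ (i : Int) (j : Int) (order : Int), Dom_hilbert_encode i j order → Pre_hilbert_encode i j order → Spec_hilbert_encode i j order (hilbert_encode i j order)

-- ===== LEMMAS AND PROOFS =====

def pvBit (a : Int) (k : Nat) : Int := (a >>> k) % 2

theorem pvShift_eq (a : Int) (k : Nat) : a >>> k = a / (2 ^ k : Int) := by
  have := Int.shiftRight_eq_div_pow a k
  rw [this]; push_cast; ring_nf

theorem pvBit_cases (a : Int) (k : Nat) : pvBit a k = 0 ∨ pvBit a k = 1 := Int.emod_two_eq _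

theorem pvBit_natCast (m : Nat) (k : Nat) : pvBit (m : Int) k = ((m.testBit k).toNat : Int) := by
  unfold pvBit
  rw [pvShift_eq, Nat.testBit_eq_decide_div_mod_eq]
  have h1 : ((m : Int)) / (2 ^ k : Int) = ((m / 2 ^ k : Nat) : Int) := by push_cast; ring_nf
  rw [h1]
  have h2 : ((m / 2 ^ k : Nat) : Int) % 2 = ((m / 2 ^ k % 2 : Nat) : Int) := by push_cast; ring_nf
  rw [h2]
  rcases Nat.mod_two_eq_zero_or_one (m / 2 ^ k) with h | h <;> simp [h]

theorem pvDiv_neg (x : Int) (k : Nat) : (-1 - x) / (2 ^ k : Int) = -1 - x / (2 ^ k : Int) := by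
  have hb : (0 : Int) < 2 ^ k := by positivity
  have hx := Int.emod_nonneg x (ne_of_gt hb)
  have hx2 := Int.emod_lt_of_pos x hb
  have hq := Int.ediv_add_emod x (2 ^ k)
  exact ((Int.ediv_emod_unique (a := -1 - x) (b := 2 ^ k)
      (q := -1 - x / (2 ^ k : Int)) (r := 2 ^ k - 1 - x % (2 ^ k : Int)) hb).mpr
      ⟨by nlinarith [hq], by omega, by omega⟩).1

theorem pvBit_neg (x : Int) (k : Nat) : pvBit (-1 - x) k = 1 - pvBit x k := by
  unfold pvBit
  rw [pvShift_eq, pvShift_eq, pvDiv_neg]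
  omega

theorem pvToNat_pow (k : Nat) : ((2:Int) ^ k).toNat = 2 ^ k := by
  have : ((2:Int) ^ k) = ((2 ^ k : Nat) : Int) := by push_cast; ring
  rw [this, Int.toNat_natCast]

theorem pvBand_two_pow (a : Int) (k : Nat) :
    PySem.Int.band a ((2 : Int) ^ k) = pvBit a k * 2 ^ k := by
  have hb : (0 : Int) ≤ 2 ^ k := by positivity
  unfold PySem.Int.band
  by_cases ha : 0 ≤ a
  · rw [if_pos ha, if_pos hb, pvToNat_pow, Nat.and_two_pow]
    have h2 : ((a.toNat : Int)) = a := Int.toNat_of_nonneg ha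
    have h3 := pvBit_natCast a.toNat k
    rw [h2] at h3
    rw [h3]; push_cast; ring
  · rw [if_neg ha, if_pos hb, pvToNat_pow]
    push_neg at ha
    set m := (-a - 1).toNat with hm
    have hma : a = -1 - (m : Int) := by omega
    have h2 : pvBit a k = 1 - pvBit (m : Int) k := by rw [hma]; exact pvBit_neg _ _
    rw [Nat.two_pow_and, h2, pvBit_natCast]
    have hle : 2 ^ k * (m.testBit k).toNat ≤ 2 ^ k := by
      rcases m.testBit k with _|_ <;> simp
    have hcast : ((2 ^ k - 2 ^ k * (m.testBit k).toNat : Nat) : Int)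
        = (2^k : Int) - (2^k : Int) * ((m.testBit k).toNat : Int) := by
      rw [Nat.cast_sub hle]; push_cast; ring
    rw [hcast]; ring

def pvTf (x flip : Int) : Int := if flip = 1 then -1 - x else x

theorem pvBand_two_pow_pos (a : Int) (k : Nat) :
    (0 < PySem.Int.band a ((2 : Int) ^ k)) ↔ pvBit a k = 1 := by
  rw [pvBand_two_pow]
  have hb : (0 : Int) < 2 ^ k := by positivity
  rcases pvBit_cases a k with h | h <;> simp [h] <;> nlinarith

theorem pvBit_of_emod_eq {a b : Int} (k : Nat)
    (h : a % (2 ^ (k + 1) : Int) = b % (2 ^ (k + 1) : Int)) : pvBit a k = pvBit b k := by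
  have key : ∀ c : Int, pvBit c k = (c % (2 ^ (k + 1) : Int)) / 2 ^ k % 2 := by
    intro c
    unfold pvBit
    rw [pvShift_eq]
    have hb : (0 : Int) < 2 ^ k := by positivity
    have hb1 : (0 : Int) < 2 ^ (k + 1) := by positivity
    have hq := Int.ediv_add_emod c (2 ^ (k + 1))
    set q := c / (2 ^ (k + 1) : Int)
    set r := c % (2 ^ (k + 1) : Int) with hr
    have hr0 : 0 ≤ r := Int.emod_nonneg c (ne_of_gt hb1)
    have hr1 : r < 2 ^ (k + 1) := Int.emod_lt_of_pos c hb1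
    have hc : c = r + (2 * q) * 2 ^ k := by rw [pow_succ] at hq; nlinarith
    rw [hc, Int.add_mul_ediv_right _ _ (ne_of_gt hb)]
    have hd0 : 0 ≤ r / (2 ^ k : Int) := Int.ediv_nonneg hr0 (le_of_lt hb)
    have hd1 : r / (2 ^ k : Int) < 2 := by
      rw [Int.ediv_lt_iff_lt_mul hb]; rw [pow_succ] at hr1; nlinarith
    omega
  rw [key a, key b, h]

theorem pvEmod_step {a b : Int} (k : Nat)
    (h : a % (2 ^ (k + 1) : Int) = b % (2 ^ (k + 1) : Int)) :
    a % (2 ^ k : Int) = b % (2 ^ k : Int) := by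
  have hd : (2 ^ k : Int) ∣ 2 ^ (k + 1) := ⟨2, by ring⟩
  calc a % (2 ^ k : Int) = a % (2 ^ (k + 1) : Int) % 2 ^ k := (Int.emod_emod_of_dvd a hd).symm
    _ = b % (2 ^ (k + 1) : Int) % 2 ^ k := by rw [h]
    _ = b % (2 ^ k : Int) := Int.emod_emod_of_dvd b hd

theorem pvRx_eq (k : Nat) (a x flip : Int) (hf : flip = 0 ∨ flip = 1)
    (h : a % (2 ^ (k + 1) : Int) = pvTf x flip % (2 ^ (k + 1) : Int)) :
    (if 0 < PySem.Int.band a ((2 : Int) ^ k) then (1 : Int) else 0)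
      = PySem.Int.bxor (pvBit x k) flip := by
  have hb := pvBit_of_emod_eq k h
  rcases hf with hf | hf <;> subst hf
  · have hx : pvBit a k = pvBit x k := by
      rw [hb]; unfold pvTf; norm_num
    rcases pvBit_cases x k with h1 | h1
    · rw [if_neg (by rw [pvBand_two_pow_pos, hx, h1]; norm_num), h1]; decide
    · rw [if_pos ((pvBand_two_pow_pos a k).mpr (hx.trans h1)), h1]; decide
  · have hx : pvBit a k = 1 - pvBit x k := by
      rw [hb, show pvTf x 1 = -1 - x from by simp [pvTf], pvBit_neg]
    rcases pvBit_cases x k with h1 | h1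
    · rw [if_pos ((pvBand_two_pow_pos a k).mpr (by omega)), h1]; decide
    · rw [if_neg (by rw [pvBand_two_pow_pos]; omega), h1]; decide

theorem pvCong_flip {M ja y flip : Int} (hf : flip = 0 ∨ flip = 1)
    (h : ja % M = pvTf y flip % M) :
    (M - 1 - ja) % M = pvTf y (PySem.Int.bxor flip 1) % M := by
  have h1 : PySem.Int.bxor flip 1 = 1 - flip := by rcases hf with h|h <;> rw [h] <;> decide
  have h2 : pvTf y (1 - flip) = -1 - pvTf y flip := by
    rcases hf with h|h <;> rw [h] <;> simp [pvTf]
  rw [h1, h2]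
  have h3 : M - 1 - ja = (-1 - ja) + M * 1 := by ring
  rw [h3, Int.add_mul_emod_self_left, Int.sub_emod, h, ← Int.sub_emod]

theorem pvLoopA_stop (d i j s : Int) (hs : ¬ 0 < s) : pvLoopA d i j s = d := by
  rw [pvLoopA, dif_neg hs]

theorem pvLoopB_stop (i j d sw flip k : Int) (hk : ¬ 0 ≤ k) : pvLoopB i j d sw flip k = d := by
  rw [pvLoopB, dif_neg hk]

theorem pvLoopA_step (d i j s : Int) (hs : 0 < s) :
    pvLoopA d i j s =
      (if (if 0 < PySem.Int.band j s then (1:Int) else 0) = 0 then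
        (if (if 0 < PySem.Int.band i s then (1:Int) else 0) = 1 then
          pvLoopA (d + s * s * PySem.Int.bxor (3 * (if 0 < PySem.Int.band i s then (1:Int) else 0)) (if 0 < PySem.Int.band j s then (1:Int) else 0)) (s - 1 - j) (s - 1 - i) (s >>> (1 : Nat))
        else
          pvLoopA (d + s * s * PySem.Int.bxor (3 * (if 0 < PySem.Int.band i s then (1:Int) else 0)) (if 0 < PySem.Int.band j s then (1:Int) else 0)) j i (s >>> (1 : Nat)))
      else
        pvLoopA (d + s * s * PySem.Int.bxor (3 * (if 0 < PySem.Int.band i s then (1:Int) else 0)) (if 0 < PySem.Int.band j s then (1:Int) else 0)) i j (s >>> (1 : Nat))) := by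
  rw [pvLoopA, dif_pos hs]

theorem pvLoopB_step (i j d sw flip k : Int) (hk : 0 ≤ k) :
    pvLoopB i j d sw flip k =
      (if PySem.Int.bxor (if sw = 1 then PySem.Int.band (i >>> k.toNat) 1 else PySem.Int.band (j >>> k.toNat) 1) flip = 0 then
        pvLoopB i j (d + ((1 : Int) <<< (2 * k).toNat) * PySem.Int.bxor (3 * PySem.Int.bxor (if sw = 1 then PySem.Int.band (j >>> k.toNat) 1 else PySem.Int.band (i >>> k.toNat) 1) flip) (PySem.Int.bxor (if sw = 1 then PySem.Int.band (i >>> k.toNat) 1 else PySem.Int.band (j >>> k.toNat) 1) flip)) (PySem.Int.bxor sw 1) (PySem.Int.bxor flip (PySem.Int.bxor (if sw = 1 then PySem.Int.band (j >>> k.toNat) 1 else PySem.Int.band (i >>> k.toNat) 1) flip)) (k - 1)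
      else
        pvLoopB i j (d + ((1 : Int) <<< (2 * k).toNat) * PySem.Int.bxor (3 * PySem.Int.bxor (if sw = 1 then PySem.Int.band (j >>> k.toNat) 1 else PySem.Int.band (i >>> k.toNat) 1) flip) (PySem.Int.bxor (if sw = 1 then PySem.Int.band (i >>> k.toNat) 1 else PySem.Int.band (j >>> k.toNat) 1) flip)) sw flip (k - 1)) := by
  rw [pvLoopB, dif_pos hk]

theorem pvBand1 (a : Int) : PySem.Int.band a 1 = a % 2 := by
  rw [PySem.Int.band_one]
  unfold PySem.Int.mod
  rw [Int.fmod_eq_emod]; norm_num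

theorem pvMain : ∀ (n : Nat) (i j ia ja d sw flip : Int),
    (sw = 0 ∨ sw = 1) → (flip = 0 ∨ flip = 1) →
    ia % (2 ^ (n + 1) : Int) = pvTf (if sw = 1 then j else i) flip % (2 ^ (n + 1) : Int) →
    ja % (2 ^ (n + 1) : Int) = pvTf (if sw = 1 then i else j) flip % (2 ^ (n + 1) : Int) →
    pvLoopA d ia ja ((2 : Int) ^ n) = pvLoopB i j d sw flip ((n : Nat) : Int) := by
  intro n
  induction n with
  | zero =>
    intro i j ia ja d sw flip hsw hf h1 h2
    rw [pvLoopA_step _ _ _ _ (by norm_num : (0:Int) < 2 ^ 0),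
        pvLoopB_step _ _ _ _ _ _ (by norm_num : (0:Int) ≤ ((0:Nat) : Int))]
    have hbi : PySem.Int.band (i >>> (((0:Nat) : Int)).toNat) 1 = pvBit i 0 := by
      rw [Int.toNat_natCast, pvBand1]; rfl
    have hbj : PySem.Int.band (j >>> (((0:Nat) : Int)).toNat) 1 = pvBit j 0 := by
      rw [Int.toNat_natCast, pvBand1]; rfl
    have hrxA := pvRx_eq 0 ia (if sw = 1 then j else i) flip hf h1
    have hryA := pvRx_eq 0 ja (if sw = 1 then i else j) flip hf h2
    have hselx : (if sw = 1 then pvBit j 0 else pvBit i 0) = pvBit (if sw = 1 then j else i) 0 :=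
      (apply_ite (fun t => pvBit t 0) (sw = 1) j i).symm
    have hsely : (if sw = 1 then pvBit i 0 else pvBit j 0) = pvBit (if sw = 1 then i else j) 0 :=
      (apply_ite (fun t => pvBit t 0) (sw = 1) i j).symm
    have hcoef : ((1:Int) <<< (2 * ((0:Nat) : Int)).toNat) = (2:Int) ^ 0 * 2 ^ 0 := by
      norm_num
    have hsh : ((2:Int) ^ (0:Nat)) >>> (1:Nat) = 0 := by decide
    have hk1 : ((0:Nat) : Int) - 1 = (-1 : Int) := by norm_num
    rw [hrxA, hryA, hbi, hbj, hselx, hsely, hcoef, hsh, hk1]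
    split_ifs <;>
      rw [pvLoopA_stop _ _ _ _ (by norm_num), pvLoopB_stop _ _ _ _ _ _ (by norm_num)]
  | succ n ih =>
    intro i j ia ja d sw flip hsw hf h1 h2
    rw [pvLoopA_step _ _ _ _ (by positivity : (0:Int) < 2 ^ (n+1)),
        pvLoopB_step _ _ _ _ _ _ (by positivity : (0:Int) ≤ ((n+1:Nat) : Int))]
    have hbi : PySem.Int.band (i >>> (((n+1:Nat) : Int)).toNat) 1 = pvBit i (n+1) := by
      rw [Int.toNat_natCast, pvBand1]; rfl
    have hbj : PySem.Int.band (j >>> (((n+1:Nat) : Int)).toNat) 1 = pvBit j (n+1) := by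
      rw [Int.toNat_natCast, pvBand1]; rfl
    have hrxA := pvRx_eq (n+1) ia (if sw = 1 then j else i) flip hf h1
    have hryA := pvRx_eq (n+1) ja (if sw = 1 then i else j) flip hf h2
    have hselx : (if sw = 1 then pvBit j (n+1) else pvBit i (n+1)) = pvBit (if sw = 1 then j else i) (n+1) :=
      (apply_ite (fun t => pvBit t (n+1)) (sw = 1) j i).symm
    have hsely : (if sw = 1 then pvBit i (n+1) else pvBit j (n+1)) = pvBit (if sw = 1 then i else j) (n+1) :=
      (apply_ite (fun t => pvBit t (n+1)) (sw = 1) i j).symm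
    have hcoef : ((1:Int) <<< (2 * ((n+1:Nat) : Int)).toNat) = (2:Int) ^ (n+1) * 2 ^ (n+1) := by
      have ht : (2 * ((n+1:Nat) : Int)).toNat = 2 * (n+1) := by push_cast; omega
      rw [ht, Int.shiftLeft_eq, one_mul, two_mul, pow_add]
    have hsh : ((2:Int) ^ (n+1)) >>> (1:Nat) = 2 ^ n := by
      rw [pvShift_eq, pow_one, pow_succ, Int.mul_ediv_cancel _ (by norm_num)]
    have hk1 : ((n+1:Nat) : Int) - 1 = ((n:Nat) : Int) := by push_cast; ring
    rw [hrxA, hryA, hbi, hbj, hselx, hsely, hcoef, hsh, hk1]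
    by_cases hry : PySem.Int.bxor (pvBit (if sw = 1 then i else j) (n+1)) flip = 0
    · rw [if_pos hry, if_pos hry]
      have hrx01 : PySem.Int.bxor (pvBit (if sw = 1 then j else i) (n+1)) flip = 0 ∨
          PySem.Int.bxor (pvBit (if sw = 1 then j else i) (n+1)) flip = 1 := by
        rcases pvBit_cases (if sw = 1 then j else i) (n+1) with hbx | hbx <;>
          rcases hf with hfv | hfv <;> rw [hbx, hfv] <;> decide
      have hsel1 : (if PySem.Int.bxor sw 1 = 1 then j else i) = (if sw = 1 then i else j) := by
        rcases hsw with h | h <;> rw [h] <;> norm_num [show PySem.Int.bxor 0 1 = 1 from by decide,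
          show PySem.Int.bxor 1 1 = 0 from by decide]
      have hsel2 : (if PySem.Int.bxor sw 1 = 1 then i else j) = (if sw = 1 then j else i) := by
        rcases hsw with h | h <;> rw [h] <;> norm_num [show PySem.Int.bxor 0 1 = 1 from by decide,
          show PySem.Int.bxor 1 1 = 0 from by decide]
      have hsw' : PySem.Int.bxor sw 1 = 0 ∨ PySem.Int.bxor sw 1 = 1 := by
        rcases hsw with h | h <;> rw [h] <;> decide
      rcases hrx01 with hrx | hrx <;> rw [hrx]
      · rw [if_neg (by norm_num), PySem.Int.bxor_zero]
        refine ih i j ja ia _ (PySem.Int.bxor sw 1) flip hsw' hf ?_ ?_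
        · rw [hsel1]; exact pvEmod_step _ h2
        · rw [hsel2]; exact pvEmod_step _ h1
      · rw [if_pos rfl]
        have hf' : PySem.Int.bxor flip 1 = 0 ∨ PySem.Int.bxor flip 1 = 1 := by
          rcases hf with h | h <;> rw [h] <;> decide
        refine ih i j _ _ _ (PySem.Int.bxor sw 1) (PySem.Int.bxor flip 1) hsw' hf' ?_ ?_
        · rw [hsel1]; exact pvCong_flip hf (pvEmod_step _ h2)
        · rw [hsel2]; exact pvCong_flip hf (pvEmod_step _ h1)
    · rw [if_neg hry, if_neg hry]
      exact ih i j ia ja _ sw flip hsw hf (pvEmod_step _ h1) (pvEmod_step _ h2)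


theorem hilbert_encode_spec : Claim_equal_hilbert_encode := by
  unfold Claim_equal_hilbert_encode Spec_hilbert_encode Pre_hilbert_encode
  intro i j order _ hord
  unfold hilbert_encode hilbert_encode_alt
  have h1 : (1 : Int) <<< (order - 1).toNat = 2 ^ (order - 1).toNat := by
    rw [Int.shiftLeft_eq, one_mul]
  have h2 : order - 1 = (((order - 1).toNat : Nat) : Int) := by omega
  rw [h1, h2]
  exact pvMain (order - 1).toNat i j i j 0 0 0 (Or.inl rfl) (Or.inl rfl)
    (by simp [pvTf]) (by simp [pvTf])
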